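-- pv_equiv track=rewrite | github.com/satwiksunnam19/Nano-GPT | benchmark_attention_124m.py | calculate_gpt_params
-- ===== SOURCE A (Python) =====
-- def calculate_gpt_params(n_layer, n_embd, n_head, n_kv_heads, vocab_size, block_size, attention_type='standard'):
--     """Calculate approximate GPT parameter count."""
--     # Embeddings (shared)
--     params = vocab_size * n_embd  # token embeddings
--     params += block_size * n_embd  # position embeddings
--
--     # Per-layer parameters
--     for _ in range(n_layer):
--         # LayerNorm 1
--         params += 2 * n_embd
--
--         # Attention projections
--         if attention_type == 'standard' or attention_type == 'mha':
--             # MHA: full Q, K, V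
--             params += 3 * n_embd * n_embd  # Q, K, V
--         elif attention_type == 'gqa':
--             # GQA: full Q, reduced K,V
--             head_dim = n_embd // n_head
--             params += n_embd * n_embd  # Q projection
--             params += n_kv_heads * head_dim * n_embd  # K projection
--             params += n_kv_heads * head_dim * n_embd  # V projection
--
--         # Attention output projection
--         params += n_embd * n_embd
--
--         # LayerNorm 2
--         params += 2 * n_embd
--
--         # MLP (4x expansion)
--         params += 4 * n_embd * n_embd  # up projection
--         params += 4 * n_embd * n_embd  # down projection
--
--     # Final LayerNorm
--     params += 2 * n_embd
--
--     return params
-- ===== SOURCE B (Python) =====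
-- def calculate_gpt_params(n_layer, n_embd, n_head, n_kv_heads, vocab_size, block_size, attention_type='standard'):
--     """Closed-form GPT parameter count: embeddings + layers * per-layer constant + final norm."""
--     base = (vocab_size + block_size + 2) * n_embd
--     layers = n_layer if n_layer > 0 else 0
--     if layers == 0:
--         return base
--     if attention_type in ('standard', 'mha'):
--         attn = 3 * n_embd * n_embd
--     elif attention_type == 'gqa':
--         attn = n_embd * n_embd + 2 * n_kv_heads * (n_embd // n_head) * n_embd
--     else:
--         attn = 0
--     per_layer = attn + 9 * n_embd * n_embd + 4 * n_embd
--     return base + layers * per_layer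
-- ===== Notes on version B (the rewrite author's own statement) =====
-- stated objective: faster
-- what changed: Replaces the per-layer accumulation loop with a closed form: one per-layer constant multiplied by max(n_layer, 0) plus the embedding and final-norm terms, returning early when no layers exist.
import Mathlib
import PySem

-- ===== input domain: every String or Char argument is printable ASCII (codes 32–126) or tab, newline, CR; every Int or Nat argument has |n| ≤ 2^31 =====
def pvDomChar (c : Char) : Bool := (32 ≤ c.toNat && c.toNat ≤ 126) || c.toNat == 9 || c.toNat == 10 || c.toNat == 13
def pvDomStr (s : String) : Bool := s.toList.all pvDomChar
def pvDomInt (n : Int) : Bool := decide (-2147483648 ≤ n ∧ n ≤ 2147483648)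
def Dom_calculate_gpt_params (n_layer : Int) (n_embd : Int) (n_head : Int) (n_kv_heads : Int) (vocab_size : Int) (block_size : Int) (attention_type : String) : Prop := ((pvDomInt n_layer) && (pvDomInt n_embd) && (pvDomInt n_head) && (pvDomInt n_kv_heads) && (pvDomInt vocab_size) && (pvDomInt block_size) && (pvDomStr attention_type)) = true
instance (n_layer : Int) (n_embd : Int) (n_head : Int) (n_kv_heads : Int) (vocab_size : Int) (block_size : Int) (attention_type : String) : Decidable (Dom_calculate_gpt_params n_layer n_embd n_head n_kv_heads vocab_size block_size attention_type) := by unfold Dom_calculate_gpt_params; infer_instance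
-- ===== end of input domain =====

-- B replaces A's per-layer accumulation loop by a closed form (per-layer constant * max(n_layer,0) + embeddings + final norm), returning early when there are no layers.

-- ===== PORT A =====
def calculate_gpt_params (n_layer : Int) (n_embd : Int) (n_head : Int) (n_kv_heads : Int) (vocab_size : Int) (block_size : Int) (attention_type : String) : Int :=
  let params := vocab_size * n_embd
  let params := params + block_size * n_embd
  let params :=
    (PySem.List.pyRange 0 n_layer 1).foldl (fun params _ =>
      let params := params + 2 * n_embd
      let params :=
        if attention_type == "standard" || attention_type == "mha" then
          params + 3 * n_embd * n_embd
        else if attention_type == "gqa" then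
          let head_dim := PySem.Int.floordiv n_embd n_head
          let params := params + n_embd * n_embd
          let params := params + n_kv_heads * head_dim * n_embd
          params + n_kv_heads * head_dim * n_embd
        else params
      let params := params + n_embd * n_embd
      let params := params + 2 * n_embd
      let params := params + 4 * n_embd * n_embd
      params + 4 * n_embd * n_embd) params
  params + 2 * n_embd

-- ===== PORT B =====
def calculate_gpt_params_alt (n_layer : Int) (n_embd : Int) (n_head : Int) (n_kv_heads : Int) (vocab_size : Int) (block_size : Int) (attention_type : String) : Int :=
  let base := (vocab_size + block_size + 2) * n_embd
  let layers := if n_layer > 0 then n_layer else 0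
  if layers == 0 then base
  else
    let attn :=
      if attention_type == "standard" || attention_type == "mha" then
        3 * n_embd * n_embd
      else if attention_type == "gqa" then
        n_embd * n_embd + 2 * n_kv_heads * (PySem.Int.floordiv n_embd n_head) * n_embd
      else 0
    let per_layer := attn + 9 * n_embd * n_embd + 4 * n_embd
    base + layers * per_layer

-- ===== PRECONDITION & SPEC =====
-- Pre_ excludes only inputs where Python A raises ZeroDivisionError: attention_type = "gqa"
-- with n_head = 0 and the loop actually entered (n_layer > 0).
def Pre_calculate_gpt_params (n_layer : Int) (n_embd : Int) (n_head : Int) (n_kv_heads : Int) (vocab_size : Int) (block_size : Int) (attention_type : String) : Prop :=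
  attention_type = "gqa" → n_layer > 0 → n_head ≠ 0
instance (n_layer : Int) (n_embd : Int) (n_head : Int) (n_kv_heads : Int) (vocab_size : Int) (block_size : Int) (attention_type : String) : Decidable (Pre_calculate_gpt_params n_layer n_embd n_head n_kv_heads vocab_size block_size attention_type) := by unfold Pre_calculate_gpt_params; infer_instance

def pvWitness_calculate_gpt_params : Int × Int × Int × Int × Int × Int × String := (2, 8, 4, 2, 100, 16, "gqa")

def Spec_calculate_gpt_params (n_layer : Int) (n_embd : Int) (n_head : Int) (n_kv_heads : Int) (vocab_size : Int) (block_size : Int) (attention_type : String) (out : Int) : Prop := out = calculate_gpt_params_alt n_layer n_embd n_head n_kv_heads vocab_size block_size attention_type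
instance (n_layer : Int) (n_embd : Int) (n_head : Int) (n_kv_heads : Int) (vocab_size : Int) (block_size : Int) (attention_type : String) (out : Int) : Decidable (Spec_calculate_gpt_params n_layer n_embd n_head n_kv_heads vocab_size block_size attention_type out) := by unfold Spec_calculate_gpt_params; infer_instance

-- ===== CLAIM =====
def Claim_equal_calculate_gpt_params : Prop := ∀ (n_layer : Int) (n_embd : Int) (n_head : Int) (n_kv_heads : Int) (vocab_size : Int) (block_size : Int) (attention_type : String), Dom_calculate_gpt_params n_layer n_embd n_head n_kv_heads vocab_size block_size attention_type → Pre_calculate_gpt_params n_layer n_embd n_head n_kv_heads vocab_size block_size attention_type → Spec_calculate_gpt_params n_layer n_embd n_head n_kv_heads vocab_size block_size attention_type (calculate_gpt_params n_layer n_embd n_head n_kv_heads vocab_size block_size attention_type)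

-- ===== LEMMAS AND PROOFS =====

-- A fold whose body adds the same constant c at every step just adds length * c.
lemma foldl_const_add {B : Type} (f : Int → B → Int) (c : Int)
    (hf : ∀ a b, f a b = a + c) (l : List B) :
    ∀ s : Int, l.foldl f s = s + (l.length : Int) * c := by
  induction l with
  | nil => intro s; simp
  | cons x xs ih =>
      intro s
      simp only [List.foldl_cons, ih, hf, List.length_cons]
      push_cast
      ring

-- ===== VERDICT =====
theorem calculate_gpt_params_spec : Claim_equal_calculate_gpt_params := by
  intro n_layer n_embd n_head n_kv_heads vocab_size block_size attention_type _ _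
  unfold Spec_calculate_gpt_params calculate_gpt_params calculate_gpt_params_alt
  simp only []
  by_cases hl : n_layer > 0
  · have hlay : (if n_layer > 0 then n_layer else 0) = n_layer := by simp [hl]
    have hne : ((if n_layer > 0 then n_layer else 0) == (0 : Int)) = false := by
      simp [hlay]; omega
    rw [hne]
    simp only [Bool.false_eq_true, if_false]
    by_cases h1 : (attention_type == "standard" || attention_type == "mha") = true
    · rw [foldl_const_add _ (12 * n_embd * n_embd + 4 * n_embd)
          (by intro a b; simp only [h1, if_pos]; ring)]
      simp only [h1, if_pos, PySem.List.length_pyRange_one, hlay, Int.sub_zero]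
      have : ((n_layer.toNat : Int)) = n_layer := by omega
      rw [this]; ring
    · by_cases h2 : (attention_type == "gqa") = true
      · rw [foldl_const_add _
            (10 * n_embd * n_embd + 2 * n_kv_heads * (PySem.Int.floordiv n_embd n_head) * n_embd + 4 * n_embd)
            (by intro a b; simp only [h1, h2, if_neg, if_pos, Bool.false_eq_true, not_false_iff]; ring)]
        simp only [h1, h2, if_neg, if_pos, Bool.false_eq_true, not_false_iff,
          PySem.List.length_pyRange_one, hlay, Int.sub_zero]
        have : ((n_layer.toNat : Int)) = n_layer := by omega
        rw [this]; ring
      · rw [foldl_const_add _ (9 * n_embd * n_embd + 4 * n_embd)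
            (by intro a b; simp only [h1, h2, if_neg, Bool.false_eq_true, not_false_iff]; ring)]
        simp only [h1, h2, if_neg, Bool.false_eq_true, not_false_iff,
          PySem.List.length_pyRange_one, hlay, Int.sub_zero]
        have : ((n_layer.toNat : Int)) = n_layer := by omega
        rw [this]; ring
  · have hlay : (if n_layer > 0 then n_layer else 0) = 0 := by simp [hl]
    have hz : ((if n_layer > 0 then n_layer else 0) == (0 : Int)) = true := by
      simp [hlay]
    rw [hz]
    simp only [if_true]
    have hempty : PySem.List.pyRange 0 n_layer 1 = [] := by
      apply List.eq_nil_of_length_eq_zero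
      simp [PySem.List.length_pyRange_one]; omega
    rw [hempty]
    simp only [List.foldl_nil]
    ring
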